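-- pv_equiv track=rewrite | github.com/JangJaehoon/algo | Jaehoon/Hash3_Programmers.py | solution
-- ===== SOURCE A (Python) =====
-- def solution(clothes):
--     closet = dict()
--     num_category = []
--     choice = 1
--
--     for name, category in clothes:
--         if category in closet:
--             closet[category].append(name)
--         else:
--             closet[category] = [name]
--
--     for key in closet.keys():
--         num_category.append(len(closet[key]))
--
--     for i in num_category:
--         choice += i + 1
--     choice -= 1
--
--     return choice
-- ===== SOURCE B (Python) =====
-- def solution(clothes):
--     categories = set()
--     total = 0
--     for name, category in clothes:
--         categories.add(category)
--         total += 1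
--     return total + len(categories)
-- ===== Notes on version B (the rewrite author's own statement) =====
-- stated objective: simpler
-- what changed: A groups names into per-category lists in a dict and then runs two more loops to sum len(list)+1 per category; B uses the closed form (number of clothes) + (number of distinct categories), computed in a single pass with a set and a counter.
import Mathlib
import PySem

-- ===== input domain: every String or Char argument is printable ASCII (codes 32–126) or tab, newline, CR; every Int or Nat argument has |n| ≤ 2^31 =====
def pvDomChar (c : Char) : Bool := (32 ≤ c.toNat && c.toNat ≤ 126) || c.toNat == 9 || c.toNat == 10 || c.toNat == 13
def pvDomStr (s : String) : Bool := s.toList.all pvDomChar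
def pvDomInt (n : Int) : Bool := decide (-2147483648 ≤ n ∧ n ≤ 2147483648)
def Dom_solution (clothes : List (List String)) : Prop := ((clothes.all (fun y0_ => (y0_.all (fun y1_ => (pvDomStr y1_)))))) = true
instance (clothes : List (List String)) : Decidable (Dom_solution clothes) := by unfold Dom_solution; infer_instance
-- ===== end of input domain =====

-- B is simpler: A groups names per category in a dict and sums len+1 over it in two
-- further loops; B computes the closed form (#clothes + #distinct categories) in one pass.

-- ===== PORT A =====
-- one step of A's grouping loop (items outside Pre_, i.e. not 2-element, raise in Python; left unchanged here)
def solutionStepA (d : PySem.Dict String (List String)) (item : List String) :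
    PySem.Dict String (List String) :=
  match item with
  | [name, category] =>
      if d.contains category then d.modify category [] (fun l => l ++ [name])
      else d.insert category [name]
  | _ => d

def solution (clothes : List (List String)) : Int :=
  let closet := clothes.foldl solutionStepA PySem.Dict.empty
  let num_category := closet.keys.map (fun key => ((closet.getD key []).length : Int))
  let choice := num_category.foldl (fun c i => c + (i + 1)) 1
  choice - 1

-- ===== PORT B =====
def solutionStepB (st : Int × PySem.Set String) (item : List String) :
    Int × PySem.Set String :=
  match item with
  | [_name, category] => (st.1 + 1, PySem.Set.add st.2 category)
  | _ => st

def solution_alt (clothes : List (List String)) : Int :=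
  let st := clothes.foldl solutionStepB (0, PySem.Set.empty)
  st.1 + PySem.Set.len st.2

-- ===== PRECONDITION & SPEC =====
-- Pre_ excludes items that are not 2-element lists: Python's unpacking 'name, category'
-- raises ValueError there (in both A and B), so A returns no value on such inputs.
def Pre_solution (clothes : List (List String)) : Prop :=
  ∀ item ∈ clothes, item.length = 2
instance (clothes : List (List String)) : Decidable (Pre_solution clothes) := by
  unfold Pre_solution; infer_instance
def pvWitness_solution : List (List String) := [["a", "x"], ["b", "x"], ["c", "y"]]

def Spec_solution (clothes : List (List String)) (out : Int) : Prop := out = solution_alt clothes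
instance (clothes : List (List String)) (out : Int) : Decidable (Spec_solution clothes out) := by unfold Spec_solution; infer_instance

-- ===== CLAIM (what is proved, stated in full; the proofs are below) =====
def Claim_equal_solution : Prop := ∀ (clothes : List (List String)), Dom_solution clothes → Pre_solution clothes → Spec_solution clothes (solution clothes)

-- ===== LEMMAS AND PROOFS =====

-- A's sum-of-values, expressed exactly as A's second/third loops read the dict
def sumA (d : PySem.Dict String (List String)) : Int :=
  (d.keys.map (fun key => ((d.getD key []).length : Int))).sum

theorem keys_insert_eq (d : PySem.Dict String (List String)) (k : String) (v : List String) :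
    (d.insert k v).keys = PySem.Set.add d.keys k := by
  have h := PySem.Dict.keys_foldl_insert [k] (fun _ _ => v) d
  simpa [List.foldl, PySem.Set.update] using h

theorem keys_modify_eq (d : PySem.Dict String (List String)) (k : String) (f : List String → List String) :
    (d.modify k [] f).keys = PySem.Set.add d.keys k := by
  rw [PySem.Dict.keys_modify, keys_insert_eq]

-- sum over a Nodup list of a function changed at one present element
theorem sum_map_update_mem {l : List String} {k : String} (hnd : l.Nodup) (hk : k ∈ l)
    (f : String → Int) :
    (l.map (fun x => if x = k then f x + 1 else f x)).sum = (l.map f).sum + 1 := by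
  induction l with
  | nil => cases hk
  | cons a t ih =>
    by_cases ha : a = k
    · subst ha
      have hat : a ∉ t := (List.nodup_cons.mp hnd).1
      have ht : t.map (fun x => if x = a then f x + 1 else f x) = t.map f := by
        apply List.map_congr_left
        intro x hx
        have : x ≠ a := fun h => hat (h ▸ hx)
        simp [this]
      simp [ht]; ring
    · have hkt : k ∈ t := by
        rcases List.mem_cons.mp hk with rfl | h
        · exact absurd rfl ha
        · exact h
      rw [List.map_cons, List.map_cons, List.sum_cons, List.sum_cons,
        ih (List.nodup_cons.mp hnd).2 hkt]
      simp [ha]; ring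

-- the loop invariant: A's dict and B's (counter, set) stay linked
theorem inv_step (clothes : List (List String)) :
    ∀ (d : PySem.Dict String (List String)) (n : Int) (s : PySem.Set String),
      (∀ item ∈ clothes, item.length = 2) →
      d.keys.Nodup → d.keys = s → sumA d = n →
      (let d' := clothes.foldl solutionStepA d
       let st := clothes.foldl solutionStepB (n, s)
       sumA d' + (d'.keys.length : Int) = st.1 + PySem.Set.len st.2) := by
  induction clothes with
  | nil =>
    intro d n s _ _ hks hsum
    simp [List.foldl, PySem.Set.len, hks, hsum]
  | cons item rest ih =>
    intro d n s hpre hnd hks hsum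
    have hitem : item.length = 2 := hpre item (List.mem_cons_self ..)
    obtain ⟨name, category, rfl⟩ : ∃ a b, item = [a, b] := by
      match item, hitem with
      | [a, b], _ => exact ⟨a, b, rfl⟩
    have hrest : ∀ it ∈ rest, it.length = 2 := fun it h => hpre it (List.mem_cons_of_mem _ h)
    simp only [List.foldl_cons, solutionStepA, solutionStepB]
    by_cases hc : category ∈ d.keys
    · -- category present: modify; set add is a no-op
      have hcontains : d.contains category = true := by
        rw [PySem.Dict.contains_eq_decide_mem_keys]; simpa
      rw [hcontains]
      simp only [if_true]
      apply ih _ (n + 1) (PySem.Set.add s category) hrest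
      · rw [keys_modify_eq]
        simp [PySem.Set.add, PySem.Set.contains, hc, hnd]
      · rw [keys_modify_eq, hks]
      · unfold sumA
        rw [keys_modify_eq]
        have hkeys : PySem.Set.add d.keys category = d.keys := by
          simp [PySem.Set.add, PySem.Set.contains, hc]
        rw [hkeys]
        have hmap : d.keys.map (fun key => (((d.modify category [] (· ++ [name])).getD key []).length : Int))
            = d.keys.map (fun x => if x = category
                then ((d.getD x []).length : Int) + 1 else ((d.getD x []).length : Int)) := by
          apply List.map_congr_left
          intro x _
          rw [PySem.Dict.getD_modify]
          by_cases hx : x = category <;> simp [hx]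
        rw [hmap, sum_map_update_mem hnd hc]
        unfold sumA at hsum
        linarith [hsum]
    · -- fresh category: insert appends; set add appends
      have hcontains : d.contains category = false := by
        rw [PySem.Dict.contains_eq_decide_mem_keys]; simpa
      rw [hcontains]
      simp only [Bool.false_eq_true, if_false]
      apply ih _ (n + 1) (PySem.Set.add s category) hrest
      · rw [keys_insert_eq]
        simp only [PySem.Set.add, PySem.Set.contains]
        simp [List.nodup_append, hnd, hc]
        exact fun a ha h => hc (h ▸ ha)
      · rw [keys_insert_eq, hks]
      · unfold sumA
        rw [keys_insert_eq]
        have hset : PySem.Set.add d.keys category = d.keys ++ [category] := by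
          simp [PySem.Set.add, PySem.Set.contains, hc]
        rw [hset, List.map_append, List.sum_append]
        have hold : d.keys.map (fun key => (((d.insert category [name]).getD key []).length : Int))
            = d.keys.map (fun key => ((d.getD key []).length : Int)) := by
          apply List.map_congr_left
          intro x hx
          rw [PySem.Dict.getD_insert]
          have : x ≠ category := fun h => hc (h ▸ hx)
          simp [this]
        rw [hold]
        unfold sumA at hsum
        simp [PySem.Dict.getD_insert]
        linarith [hsum]

-- A's tallying loops compute init + Σ(i+1)
theorem foldl_add_one (l : List Int) (init : Int) :
    l.foldl (fun c i => c + (i + 1)) init = init + l.sum + l.length := by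
  induction l generalizing init with
  | nil => simp
  | cons a t ih => simp [List.foldl_cons, ih]; ring

-- ===== VERDICT (by name: the statement is the Claim_ definition above) =====
theorem solution_spec : Claim_equal_solution := by
  intro clothes _ hpre
  unfold Spec_solution solution solution_alt
  simp only []
  rw [foldl_add_one]
  have h := inv_step clothes PySem.Dict.empty 0 PySem.Set.empty hpre
    (by simp [PySem.Dict.empty, PySem.Dict.keys]) (by rfl) (by rfl)
  simp only [] at h
  have : sumA (clothes.foldl solutionStepA PySem.Dict.empty)
      + ((clothes.foldl solutionStepA PySem.Dict.empty).keys.length : Int)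
      = (clothes.foldl solutionStepB (0, PySem.Set.empty)).1
      + PySem.Set.len (clothes.foldl solutionStepB (0, PySem.Set.empty)).2 := h
  unfold sumA at this
  simp only [List.length_map]
  linarith [this]
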